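-- pv_equiv track=rewrite | github.com/benquick123/code-profiling | code/izpiti/izpit01a/M-17114-1273.py | roboti
-- ===== SOURCE A (Python) =====
-- def roboti(navodila, n):
--     s = [[0,0] for i in range(n)]
--     i = 0
--     for x in navodila:
--         if x == 'J':
--             s[i][1] -= 1
--         elif x == 'S':
--             s[i][1] += 1
--         elif x == 'Z':
--             s[i][0] -= 1
--         elif x == 'V':
--             s[i][0] += 1
--         i += 1
--         i %= n
--     return ([tuple(x) for x in s])
-- ===== SOURCE B (Python) =====
-- def roboti(navodila, n):
--     res = []
--     for j in range(n):
--         chunk = navodila[j::n]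
--         res.append((chunk.count('V') - chunk.count('Z'),
--                     chunk.count('S') - chunk.count('J')))
--     return res
-- ===== Notes on version B (the rewrite author's own statement) =====
-- stated objective: alternative
-- what changed: Instead of a single round-robin pass that mutates a per-robot position array one move per character, B takes for each robot j the strided slice navodila[j::n] and computes its position directly as (count('V')-count('Z'), count('S')-count('J')).
import Mathlib
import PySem

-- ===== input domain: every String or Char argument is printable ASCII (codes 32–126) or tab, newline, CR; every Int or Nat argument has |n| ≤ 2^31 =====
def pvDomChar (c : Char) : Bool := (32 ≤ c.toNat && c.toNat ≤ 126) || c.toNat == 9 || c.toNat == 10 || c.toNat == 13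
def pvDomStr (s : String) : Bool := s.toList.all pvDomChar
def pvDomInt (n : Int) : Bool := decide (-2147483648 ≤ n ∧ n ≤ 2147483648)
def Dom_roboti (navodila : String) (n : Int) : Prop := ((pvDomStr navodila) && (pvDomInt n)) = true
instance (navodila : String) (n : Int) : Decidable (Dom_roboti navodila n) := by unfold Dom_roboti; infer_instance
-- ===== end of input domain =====

-- B replaces A's single round-robin pass (mutating a per-robot array one move per character)
-- by per-robot strided slices navodila[j::n] whose direction characters are counted
-- (objective: alternative -- per-robot grouping and counting instead of a dispatch loop).


-- ===== PORT A =====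
-- Python 's[i][...] -= 1' etc.: list indexing (a negative index wraps; out of range raises —
-- excluded by Pre_roboti; where Python would raise, this helper leaves s unchanged).
def robotiSet (s : List (Int × Int)) (i : Int) (f : Int × Int → Int × Int) : List (Int × Int) :=
  let j : Int := if i < 0 then i + s.length else i
  if 0 ≤ j ∧ j.toNat < s.length then s.set j.toNat (f (s.getD j.toNat (0, 0))) else s

-- the body of A's 'for x in navodila' loop, branches in A's order; 'i += 1; i %= n' is
-- PySem.Int.mod (Python raises on n = 0; Pre_roboti admits n = 0 only with empty navodila,
-- where this line never runs).
def robotiStep (n : Int) (st : List (Int × Int) × Int) (x : Char) : List (Int × Int) × Int :=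
  let s := st.1
  let i := st.2
  let s :=
    if x = 'J' then robotiSet s i (fun p => (p.1, p.2 - 1))
    else if x = 'S' then robotiSet s i (fun p => (p.1, p.2 + 1))
    else if x = 'Z' then robotiSet s i (fun p => (p.1 - 1, p.2))
    else if x = 'V' then robotiSet s i (fun p => (p.1 + 1, p.2))
    else s
  (s, PySem.Int.mod (i + 1) n)

def roboti (navodila : String) (n : Int) : List (Int × Int) :=
  -- s = [[0,0] for i in range(n)]  (range(n) is empty for n ≤ 0)
  let s : List (Int × Int) := (List.range n.toNat).map (fun _ => ((0 : Int), (0 : Int)))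
  (navodila.toList.foldl (robotiStep n) (s, 0)).1

-- ===== PORT B =====
-- navodila[j::n] ported on code points (PySem.List.slice?, exact); str.count with a
-- single-character needle equals the list character count. slice? is none only for step 0;
-- j ranges over range(n), so when the body runs n ≥ 1 and .getD [] never supplies its default.
def roboti_alt (navodila : String) (n : Int) : List (Int × Int) :=
  (PySem.List.pyRange 0 n 1).map (fun j =>
    let chunk := (PySem.List.slice? navodila.toList (some j) none n).getD []
    (((chunk.count 'V' : Int) - (chunk.count 'Z' : Int)),
     ((chunk.count 'S' : Int) - (chunk.count 'J' : Int))))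

-- ===== PRECONDITION & SPEC =====
-- Pre_roboti excludes exactly the inputs where A raises: n = 0 with non-empty navodila
-- (ZeroDivisionError at 'i %= n') and n < 0 with a direction character J/S/Z/V present
-- (IndexError: s is empty). Every input on which A returns is admitted.
def Pre_roboti (navodila : String) (n : Int) : Prop :=
  1 ≤ n ∨ (navodila = "" ∧ n = 0) ∨
    (n < 0 ∧ ∀ c ∈ navodila.toList, c ≠ 'J' ∧ c ≠ 'S' ∧ c ≠ 'Z' ∧ c ≠ 'V')
instance (navodila : String) (n : Int) : Decidable (Pre_roboti navodila n) := by
  unfold Pre_roboti; infer_instance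
def pvWitness_roboti : String × Int := ("JSZVx?", 2)

def Spec_roboti (navodila : String) (n : Int) (out : List (Int × Int)) : Prop := out = roboti_alt navodila n
instance (navodila : String) (n : Int) (out : List (Int × Int)) : Decidable (Spec_roboti navodila n out) := by unfold Spec_roboti; infer_instance

-- ===== CLAIM (what is proved, stated in full; the proofs are below) =====
def Claim_equal_roboti : Prop := ∀ (navodila : String) (n : Int), Dom_roboti navodila n → Pre_roboti navodila n → Spec_roboti navodila n (roboti navodila n)

-- ===== LEMMAS AND PROOFS =====
def robotiDelta (c : Char) : Int × Int :=
  if c = 'V' then (1, 0) else if c = 'Z' then (-1, 0)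
  else if c = 'S' then (0, 1) else if c = 'J' then (0, -1) else (0, 0)

def padd (p q : Int × Int) : Int × Int := (p.1 + q.1, p.2 + q.2)

def dsum (cs : List Char) : Int × Int :=
  (((cs.count 'V' : Int) - (cs.count 'Z' : Int)),
   ((cs.count 'S' : Int) - (cs.count 'J' : Int)))

def contrib (N : Nat) : List Char → Nat → Nat → Int × Int
  | [], _, _ => (0, 0)
  | c :: l, i, k => padd (if i = k then robotiDelta c else (0, 0)) (contrib N l ((i + 1) % N) k)

theorem dsum_cons (c : Char) (cs : List Char) :
    dsum (c :: cs) = padd (robotiDelta c) (dsum cs) := by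
  by_cases hV : c = 'V' <;> by_cases hZ : c = 'Z' <;> by_cases hS : c = 'S' <;>
    by_cases hJ : c = 'J' <;>
  simp_all [dsum, robotiDelta, padd, List.count_cons] <;> omega

theorem padd_zero_left (p : Int × Int) : padd (0, 0) p = p := by simp [padd]

theorem contrib_eq_dsum_shift (N : Nat) (k : Nat) (l : List Char) : ∀ p0 : Nat,
    contrib N l (p0 % N) k =
      dsum (((List.range l.length).filter (fun p => (p0 + p) % N = k)).map
        (fun p => l.getD p ' ')) := by
  induction l with
  | nil => intro p0; simp [contrib, dsum]
  | cons c l ih =>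
    intro p0
    rw [contrib]
    rw [Nat.mod_add_mod, ih (p0 + 1)]
    have hfilter : (List.range l.length).filter ((fun p => decide ((p0 + p) % N = k)) ∘ Nat.succ)
        = (List.range l.length).filter (fun p => decide ((p0 + 1 + p) % N = k)) := by
      apply List.filter_congr
      intro p _
      simp only [Function.comp_apply]
      rw [show p0 + Nat.succ p = p0 + 1 + p from by omega]
    simp only [List.length_cons, List.range_succ_eq_map, List.filter_cons, List.filter_map,
      List.map_cons, List.map_map, Nat.add_zero, hfilter]
    by_cases hk : p0 % N = k
    · simp only [hk, if_pos rfl, decide_true, if_pos, List.map_cons]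
      rw [dsum_cons]
      simp [Function.comp_def]
    · have hd : decide ((p0 + 0) % N = k) = false := by simp [hk]
      simp only [Nat.add_zero] at hd
      simp only [if_neg hk, hd, Bool.false_eq_true, if_false]
      rw [padd_zero_left]
      simp [Function.comp_def]

theorem robotiSet_length (s : List (Int × Int)) (i : Int) (f : Int × Int → Int × Int) :
    (robotiSet s i f).length = s.length := by
  unfold robotiSet
  dsimp only
  split <;> split <;> simp

theorem robotiStep_length (n : Int) (st : List (Int × Int) × Int) (x : Char) :
    (robotiStep n st x).1.length = st.1.length := by
  unfold robotiStep
  dsimp only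
  split
  · exact robotiSet_length _ _ _
  split
  · exact robotiSet_length _ _ _
  split
  · exact robotiSet_length _ _ _
  split
  · exact robotiSet_length _ _ _
  · rfl

theorem robotiSet_getElem? (s : List (Int × Int)) (i : Nat) (f : Int × Int → Int × Int)
    (hi : i < s.length) (k : Nat) :
    (robotiSet s (i : Int) f)[k]? = if i = k then (s[k]?).map f else s[k]? := by
  unfold robotiSet
  dsimp only
  have h0 : ¬ ((i : Int) < 0) := by omega
  rw [if_neg h0, if_pos ⟨by omega, by simpa using hi⟩]
  rw [List.getD_eq_getElem?_getD, Int.toNat_natCast, List.getElem?_eq_getElem hi]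
  by_cases hik : i = k
  · subst hik
    simp [List.getElem?_set, hi, List.getElem?_eq_getElem hi]
  · simp [List.getElem?_set_ne, hik]

theorem robotiStep_fst_getElem? (n : Int) (s : List (Int × Int)) (i : Nat)
    (hi : i < s.length) (c : Char) (k : Nat) :
    (robotiStep n (s, (i : Int)) c).1[k]? =
      (s[k]?).map (fun v => padd v (if i = k then robotiDelta c else (0, 0))) := by
  unfold robotiStep
  dsimp only
  by_cases hJ : c = 'J' <;> by_cases hS : c = 'S' <;> by_cases hZ : c = 'Z' <;>
    by_cases hV : c = 'V' <;>
    simp_all [robotiSet_getElem? s i _ hi, robotiDelta] <;>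
    (by_cases hik : i = k <;> cases hsk : s[k]? <;> simp_all [padd] <;> omega)

theorem robotiStep_snd (n : Int) (N : Nat) (hn : n = (N : Int)) (hN : 0 < N)
    (s : List (Int × Int)) (i : Nat) (c : Char) :
    (robotiStep n (s, (i : Int)) c).2 = (((i + 1) % N : Nat) : Int) := by
  unfold robotiStep
  dsimp only
  rw [hn, PySem.Int.mod_eq_emod_of_pos (show (0:Int) < (N:Int) from by exact_mod_cast hN)]
  push_cast
  ring

theorem foldl_robotiStep_getElem? (n : Int) (N : Nat) (hn : n = (N : Int)) (hN : 0 < N)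
    (l : List Char) : ∀ (s : List (Int × Int)) (i : Nat), s.length = N → i < N → ∀ k : Nat,
    (l.foldl (robotiStep n) (s, (i : Int))).1[k]? =
      (s[k]?).map (fun v => padd v (contrib N l i k)) := by
  induction l with
  | nil =>
    intro s i hs hi k
    cases hsk : s[k]? <;> simp [contrib, hsk, padd]
  | cons c l ih =>
    intro s i hs hi k
    rw [List.foldl_cons]
    have h2 := robotiStep_snd n N hn hN s i c
    have h1 := robotiStep_fst_getElem? n s i (by omega) c k
    have hpair : robotiStep n (s, (i : Int)) c =
        ((robotiStep n (s, (i : Int)) c).1, (((i + 1) % N : Nat) : Int)) := by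
      conv_lhs => rw [← Prod.mk.eta (p := robotiStep n (s, (i : Int)) c)]
      rw [h2]
    rw [hpair, ih _ ((i + 1) % N) (by rw [robotiStep_length]; exact hs) (Nat.mod_lt _ hN) k,
      h1, contrib]
    cases hsk : s[k]? <;> by_cases hik : i = k <;> simp [hik, padd] <;> constructor <;> ring

def selR (N : Nat) (l : List Char) (k : Nat) : List Char :=
  ((List.range l.length).filter (fun p => p % N = k)).map (fun p => l.getD p ' ')

theorem stride_index_eq (N len k : Nat) (hN : 0 < N) (hkN : k < N) (hk : k < len) :
    (List.range ((len - k + N - 1) / N)).map (fun q => k + N * q)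
      = (List.range len).filter (fun p => decide (p % N = k)) := by
  apply List.Perm.eq_of_pairwise (le := (· ≤ ·))
  · intro a b _ _ h1 h2; omega
  · exact ((List.pairwise_lt_range).map _
      (fun a b h => by have := Nat.mul_lt_mul_of_pos_left h hN; omega)).imp le_of_lt
  · exact (List.Pairwise.sublist List.filter_sublist List.pairwise_lt_range).imp le_of_lt
  · rw [List.perm_ext_iff_of_nodup
      (List.nodup_range.map (fun a b h => by
        have hc : N * a = N * b := by omega
        exact Nat.eq_of_mul_eq_mul_left hN hc))
      (List.nodup_range.filter _)]
    intro m
    simp only [List.mem_map, List.mem_range, List.mem_filter, decide_eq_true_eq]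
    constructor
    · rintro ⟨q, hq, rfl⟩
      have h1 : (q + 1) * N ≤ len - k + N - 1 := (Nat.le_div_iff_mul_le hN).mp hq
      rw [Nat.succ_mul] at h1
      have hc : N * q = q * N := Nat.mul_comm N q
      constructor
      · omega
      · rw [Nat.add_mul_mod_self_left, Nat.mod_eq_of_lt hkN]
    · rintro ⟨hm, hmod⟩
      have h2 : N * (m / N) + m % N = m := Nat.div_add_mod m N
      refine ⟨m / N, ?_, by omega⟩
      rw [Nat.lt_iff_add_one_le, Nat.le_div_iff_mul_le hN, Nat.succ_mul]
      have hc : m / N * N = N * (m / N) := Nat.mul_comm _ _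
      omega

theorem filterMap_getElem?_eq_map (l : List Char) (f : Nat → Nat) :
    ∀ qs : List Nat, (∀ q ∈ qs, f q < l.length) →
    qs.filterMap (fun q => l[f q]?) = qs.map (fun q => l.getD (f q) ' ') := by
  intro qs
  induction qs with
  | nil => intro _; rfl
  | cons q qs ih =>
    intro h
    have hq := h q (List.mem_cons_self)
    rw [List.filterMap_cons, List.map_cons, List.getElem?_eq_getElem hq,
      ih (fun r hr => h r (List.mem_cons_of_mem _ hr))]
    rw [List.getD_eq_getElem?_getD, List.getElem?_eq_getElem hq]
    rfl

theorem sliceIndices_pos (len k N : Nat) :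
    PySem.List.sliceIndices len (some (k : Int)) none ((N : Nat) : Int)
      = (min (k : Int) (len : Int), (len : Int), (N : Int)) := by
  unfold PySem.List.sliceIndices
  simp [show ¬((N : Int) < 0) by omega, show ¬((k : Int) < 0) by omega]

theorem stride_bound (N k len : Nat) (hN : 0 < N) (hk : k < len) (q : Nat)
    (hq : q < (len - k + N - 1) / N) : k + N * q < len := by
  have h1 : (q + 1) * N ≤ len - k + N - 1 := (Nat.le_div_iff_mul_le hN).mp hq
  have h2 : (q + 1) * N = N * q + N := by ring
  omega

theorem slice?_stride (l : List Char) (N k : Nat) (hN : 0 < N) (hkN : k < N) :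
    PySem.List.slice? l (some (k : Int)) none ((N : Nat) : Int) = some (selR N l k) := by
  unfold PySem.List.slice?
  rw [if_neg (by omega : ¬((N : Int) = 0)), sliceIndices_pos l.length k N]
  dsimp only
  rw [if_pos (by omega : (0 : Int) < (N : Int))]
  by_cases hk : k < l.length
  · have hmin : min (k : Int) (l.length : Int) = (k : Int) :=
      min_eq_left (by exact_mod_cast hk.le)
    rw [hmin, if_pos (by exact_mod_cast hk)]
    have h1 : ((l.length : Int) - k + N - 1) = ((l.length - k + N - 1 : Nat) : Int) := by
      push_cast; omega
    have hC : (((l.length : Int) - k + N - 1) / N).toNat = (l.length - k + N - 1) / N := by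
      rw [h1, ← Int.natCast_div, Int.toNat_natCast]
    rw [hC]
    have hidx : ∀ q : Nat, ((k : Int) + (N : Int) * (q : Int)).toNat = k + N * q := by
      intro q
      have h2 : ((k : Int) + (N : Int) * (q : Int)) = ((k + N * q : Nat) : Int) := by
        push_cast; ring
      rw [h2, Int.toNat_natCast]
    simp only [hidx]
    rw [filterMap_getElem?_eq_map l (fun q => k + N * q) _ (by
      intro q hq
      rw [List.mem_range] at hq
      exact stride_bound N k l.length hN hk q hq)]
    unfold selR
    rw [← stride_index_eq N l.length k hN hkN hk, List.map_map]
    rfl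
  · have hmin : min (k : Int) (l.length : Int) = (l.length : Int) :=
      min_eq_right (by exact_mod_cast Nat.le_of_not_lt hk)
    rw [hmin, if_neg (lt_irrefl _)]
    unfold selR
    rw [List.filter_eq_nil_iff.mpr (by
      intro p hp
      rw [List.mem_range] at hp
      simp only [decide_eq_true_eq]
      have h1 := Nat.mod_le p N
      have h2 := Nat.le_of_not_lt hk
      omega)]
    rfl

theorem contrib_eq_dsum_selR (N : Nat) (l : List Char) (k : Nat) :
    contrib N l 0 k = dsum (selR N l k) := by
  have h := contrib_eq_dsum_shift N k l 0
  simpa [selR] using h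

theorem roboti_getElem?_eq (navodila : String) (n : Int) (N : Nat) (hn : n = (N : Int))
    (hN : 0 < N) (k : Nat) :
    (roboti navodila n)[k]? = if k < N then some (dsum (selR N navodila.toList k)) else none := by
  unfold roboti
  dsimp only
  have hNt : n.toNat = N := by omega
  have hs0 : ((List.range n.toNat).map (fun _ => ((0 : Int), (0 : Int)))).length = N := by
    simp [hNt]
  have h := foldl_robotiStep_getElem? n N hn hN navodila.toList
    ((List.range n.toNat).map (fun _ => ((0 : Int), (0 : Int)))) 0 hs0 hN k
  have h0 : (((0 : Nat) : Int)) = (0 : Int) := rfl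
  rw [h0] at h
  rw [h, hNt]
  by_cases hk : k < N
  · simp [List.getElem?_map, List.getElem?_range, hk, padd_zero_left, contrib_eq_dsum_selR]
  · simp [List.getElem?_map, List.getElem?_range, hk]

theorem roboti_alt_eq (navodila : String) (n : Int) (N : Nat) (hn : n = (N : Int))
    (hN : 0 < N) :
    roboti_alt navodila n = (List.range N).map (fun k => dsum (selR N navodila.toList k)) := by
  unfold roboti_alt
  rw [hn, PySem.List.pyRange_one, List.map_map]
  have ht : ((N : Int) - 0).toNat = N := by omega
  rw [ht]
  apply List.map_congr_left
  intro k hk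
  rw [List.mem_range] at hk
  simp only [Function.comp_apply, zero_add]
  rw [slice?_stride navodila.toList N k hN hk]
  rfl

theorem foldl_robotiStep_nil (n : Int) :
    ∀ (l : List Char) (i : Int), (l.foldl (robotiStep n) ([], i)).1 = [] := by
  intro l
  induction l with
  | nil => intro i; rfl
  | cons c l ih =>
    intro i
    rw [List.foldl_cons]
    have h : robotiStep n ([], i) c = ([], (robotiStep n ([], i) c).2) := by
      unfold robotiStep robotiSet
      dsimp only
      split_ifs <;> rfl
    rw [h]
    exact ih _

theorem roboti_eq_nil_of_nonpos (navodila : String) (n : Int) (h : n ≤ 0) :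
    roboti navodila n = [] := by
  unfold roboti
  dsimp only
  have hNt : n.toNat = 0 := by omega
  rw [hNt]
  simpa using foldl_robotiStep_nil n navodila.toList 0

theorem roboti_alt_eq_nil_of_nonpos (navodila : String) (n : Int) (h : n ≤ 0) :
    roboti_alt navodila n = [] := by
  unfold roboti_alt
  rw [PySem.List.pyRange_one_eq_nil h]
  rfl

-- ===== VERDICT (by name: the statement is the Claim_ definition above) =====
theorem roboti_spec : Claim_equal_roboti := by
  intro navodila n _ _
  unfold Spec_roboti
  by_cases h : n ≤ 0
  · rw [roboti_eq_nil_of_nonpos _ _ h, roboti_alt_eq_nil_of_nonpos _ _ h]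
  · push_neg at h
    have hN : 0 < n.toNat := by omega
    have hn : n = (n.toNat : Int) := by omega
    rw [roboti_alt_eq navodila n n.toNat hn hN]
    apply List.ext_getElem?
    intro k
    rw [roboti_getElem?_eq navodila n n.toNat hn hN k]
    by_cases hk : k < n.toNat
    · simp [hk]
    · simp [hk, List.getElem?_eq_none, Nat.le_of_not_lt hk]
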